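-- pv_equiv track=rewrite | github.com/saveligulas/advent_of_code | 3_2.py | get_entire_number_from_index
-- ===== SOURCE A (Python) =====
-- def get_entire_number_from_index(current_line, index, matrixx):
--     line_to_search = matrixx[current_line]
--     numbers_found = []
--     number_found = False
--
--     for i in range(len(line_to_search)):
--         symbol = line_to_search[i]
--         if symbol.isdigit() and not number_found:
--             number_found = True
--             num_indexes = [i]
--             for k in range(i + 1, len(line_to_search)):
--                 if line_to_search[k].isdigit():
--                     num_indexes.append(k)
--                 else:
--                     break
--             numbers_found.append(num_indexes)
--         if not symbol.isdigit():
--             number_found = False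
--     for num_set in numbers_found:
--         if index in num_set:
--             counter = 0
--             number_found = 0
--             for index in reversed(num_set):
--                 number_found += int(line_to_search[index]) * (10 ** counter)
--                 counter += 1
--             return number_found
-- ===== SOURCE B (Python) =====
-- def get_entire_number_from_index(current_line, index, matrixx):
--     line = matrixx[current_line]
--     if not (0 <= index < len(line) and line[index].isdigit()):
--         return None
--     l = index
--     while l > 0 and line[l - 1].isdigit():
--         l -= 1
--     r = index + 1
--     while r < len(line) and line[r].isdigit():
--         r += 1
--     n = 0
--     for c in line[l:r]:
--         n = n * 10 + int(c)
--     return n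
-- ===== Notes on version B (the rewrite author's own statement) =====
-- stated objective: simpler
-- what changed: Instead of scanning the whole line to collect every maximal digit run and then searching the runs for the queried index, B expands left/right from the queried index while characters are digits and reads the number with a single Horner pass over that slice.
import Mathlib
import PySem

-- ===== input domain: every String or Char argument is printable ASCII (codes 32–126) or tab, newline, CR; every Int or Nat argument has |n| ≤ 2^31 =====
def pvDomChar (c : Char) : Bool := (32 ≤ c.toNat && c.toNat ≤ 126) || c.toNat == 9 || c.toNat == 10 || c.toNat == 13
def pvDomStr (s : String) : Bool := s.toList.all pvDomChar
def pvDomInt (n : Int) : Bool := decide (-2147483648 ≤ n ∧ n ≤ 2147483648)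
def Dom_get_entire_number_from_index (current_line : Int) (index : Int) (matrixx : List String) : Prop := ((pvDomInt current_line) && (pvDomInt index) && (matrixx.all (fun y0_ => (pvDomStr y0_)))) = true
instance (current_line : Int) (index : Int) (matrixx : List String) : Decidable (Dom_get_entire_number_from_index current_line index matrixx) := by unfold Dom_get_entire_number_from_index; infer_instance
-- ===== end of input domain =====

-- B expands left/right from the queried index while digits instead of collecting every
-- digit run in the line and searching them; objective: simpler (shorter, single local scan).


-- int(c) for a single digit character c (only ever applied to '0'..'9', where it is exact)
def pvDigitVal (c : Char) : Int := (c.toNat : Int) - 48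

-- ===== PORT A =====
-- inner 'for k in range(i+1, len)': append k while digit, break otherwise
def pvA_collect (cs : List Char) : List Int → List Int → List Int
  | [], acc => acc
  | k :: rest, acc =>
    if PySem.Chars.isdigit (PySem.List.pyGetD cs k ' ') then pvA_collect cs rest (acc ++ [k])
    else acc

-- one iteration of the outer 'for i in range(len(line))' loop; state = (numbers_found, number_found)
def pvA_step (cs : List Char) (st : List (List Int) × Bool) (i : Int) : List (List Int) × Bool :=
  let symbol := PySem.List.pyGetD cs i ' '
  let st' :=
    if PySem.Chars.isdigit symbol && !st.2 then
      (st.1 ++ [pvA_collect cs (PySem.List.pyRange (i + 1) (PySem.List.len cs) 1) [i]], true)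
    else st
  if !(PySem.Chars.isdigit symbol) then (st'.1, false) else st'

-- 'for index in reversed(num_set): number_found += int(line[index]) * 10**counter; counter += 1'
def pvA_value (cs : List Char) (ns : List Int) : Int :=
  (ns.reverse.foldl
    (fun st idx => (st.1 + pvDigitVal (PySem.List.pyGetD cs idx ' ') * 10 ^ st.2, st.2 + 1))
    ((0 : Int), (0 : Nat))).1

-- 'for num_set in numbers_found: if index in num_set: … return'
def pvA_find (cs : List Char) (index : Int) : List (List Int) → Option Int
  | [] => none
  | ns :: rest => if index ∈ ns then some (pvA_value cs ns) else pvA_find cs index rest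

def get_entire_number_from_index (current_line : Int) (index : Int) (matrixx : List String) : Option Int :=
  match PySem.List.pyGet? matrixx current_line with
  | none => none   -- matrixx[current_line] raises IndexError: excluded by Pre_
  | some line =>
    let cs := line.toList
    let res := (PySem.List.pyRange 0 (PySem.List.len cs) 1).foldl (pvA_step cs) ([], false)
    pvA_find cs index res.1

-- ===== PORT B =====
-- int(c) for a single digit character c (only ever applied to '0'..'9', where it is exact)
def pvDigitValB (c : Char) : Int := (c.toNat : Int) - 48

-- 'while l > 0 and line[l-1].isdigit(): l -= 1'
def pvB_left (cs : List Char) : Nat → Nat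
  | 0 => 0
  | l + 1 => if PySem.Chars.isdigit (cs.getD l ' ') then pvB_left cs l else l + 1

-- 'while r < len(line) and line[r].isdigit(): r += 1'
def pvB_right (cs : List Char) (r : Nat) : Nat :=
  if h : r < cs.length then
    if PySem.Chars.isdigit cs[r] then pvB_right cs (r + 1) else r
  else r
termination_by cs.length - r

def get_entire_number_from_index_alt (current_line : Int) (index : Int) (matrixx : List String) : Option Int :=
  match PySem.List.pyGet? matrixx current_line with
  | none => none   -- matrixx[current_line] raises IndexError: excluded by Pre_
  | some line =>
    let cs := line.toList
    if 0 ≤ index ∧ index < cs.length ∧ PySem.Chars.isdigit (cs.getD index.toNat ' ') then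
      let l := pvB_left cs index.toNat
      let r := pvB_right cs (index.toNat + 1)
      some ((PySem.List.slice cs (some (l : Int)) (some (r : Int))).foldl
              (fun n c => n * 10 + pvDigitValB c) 0)
    else none

-- ===== PRECONDITION & SPEC =====
-- A raises IndexError on matrixx[current_line] when current_line is out of range; exactly that is excluded.
def Pre_get_entire_number_from_index (current_line : Int) (index : Int) (matrixx : List String) : Prop :=
  PySem.Raise.InRange matrixx.length current_line
instance (current_line : Int) (index : Int) (matrixx : List String) : Decidable (Pre_get_entire_number_from_index current_line index matrixx) := by unfold Pre_get_entire_number_from_index; infer_instance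

def pvWitness_get_entire_number_from_index : Int × Int × List String := (0, 2, ["a12b"])

def Spec_get_entire_number_from_index (current_line : Int) (index : Int) (matrixx : List String) (out : Option Int) : Prop := out = get_entire_number_from_index_alt current_line index matrixx
instance (current_line : Int) (index : Int) (matrixx : List String) (out : Option Int) : Decidable (Spec_get_entire_number_from_index current_line index matrixx out) := by unfold Spec_get_entire_number_from_index; infer_instance

-- ===== CLAIM (what is proved, stated in full; the proofs are below) =====
def Claim_equal_get_entire_number_from_index : Prop := ∀ (current_line : Int) (index : Int) (matrixx : List String), Dom_get_entire_number_from_index current_line index matrixx → Pre_get_entire_number_from_index current_line index matrixx → Spec_get_entire_number_from_index current_line index matrixx (get_entire_number_from_index current_line index matrixx)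

-- ===== LEMMAS AND PROOFS =====

-- 'position j of cs is a digit' exactly as both ports test it (default ' ' is not a digit)
def pvD (cs : List Char) (j : Nat) : Bool := PySem.Chars.isdigit (cs.getD j ' ')

-- the value of A's 'number_found' flag when the outer loop reaches position a
def pvFlag (cs : List Char) (a : Nat) : Bool := decide (0 < a) && pvD cs (a - 1)

-- the runs A's outer loop appends from position a onwards
def pvRunsFrom (cs : List Char) (a : Nat) : List (List Int) :=
  if _h : a < cs.length then
    (if pvD cs a && !pvFlag cs a then
      [PySem.List.pyRange (a : Int) ((pvB_right cs (a + 1) : Nat) : Int) 1]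
    else []) ++ pvRunsFrom cs (a + 1)
  else []
termination_by cs.length - a

theorem pvD_eq_getElem (cs : List Char) (j : Nat) (h : j < cs.length) :
    pvD cs j = PySem.Chars.isdigit cs[j] := by
  simp [pvD, List.getElem?_eq_getElem h]

theorem pvB_right_ge (cs : List Char) (r : Nat) : r ≤ pvB_right cs r := by
  induction r using pvB_right.induct cs with
  | case1 r h hd ih => rw [pvB_right]; simp [h, hd]; omega
  | case2 r h hd => rw [pvB_right]; simp [h, hd]
  | case3 r h => rw [pvB_right]; simp [h]


theorem pvB_right_le (cs : List Char) (r : Nat) (h : r ≤ cs.length) :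
    pvB_right cs r ≤ cs.length := by
  revert h
  induction r using pvB_right.induct cs with
  | case1 r h hd ih => intro _; rw [pvB_right]; simp [h, hd]; exact ih (by omega)
  | case2 r h hd => intro _; rw [pvB_right]; simp [h, hd]; omega
  | case3 r h => intro h2; rw [pvB_right]; simp [h]; omega


theorem pvB_right_digit (cs : List Char) (r : Nat) :
    ∀ k, r ≤ k → k < pvB_right cs r → pvD cs k = true := by
  induction r using pvB_right.induct cs with
  | case1 r h hd ih =>
    intro k hk1 hk2
    rw [pvB_right] at hk2; simp [h, hd] at hk2
    rcases Nat.eq_or_lt_of_le hk1 with heq | hlt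
    · subst heq; rw [pvD_eq_getElem cs r h]; exact hd
    · exact ih k hlt hk2
  | case2 r h hd => intro k hk1 hk2; rw [pvB_right] at hk2; simp [h, hd] at hk2; omega
  | case3 r h => intro k hk1 hk2; rw [pvB_right] at hk2; simp [h] at hk2; omega


theorem pvB_right_skip (cs : List Char) (r : Nat) (h : r < cs.length) (hd : pvD cs r = true) :
    pvB_right cs r = pvB_right cs (r + 1) := by
  rw [pvB_right]
  rw [pvD_eq_getElem cs r h] at hd
  simp [h, hd]


theorem pvB_right_agree (cs : List Char) :
    ∀ j i, i ≤ j + 1 → j + 1 ≤ cs.length → (∀ k, i ≤ k → k ≤ j → pvD cs k = true) →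
    pvB_right cs i = pvB_right cs (j + 1) := by
  intro j i
  induction hfuel : j + 1 - i generalizing i with
  | zero =>
    intro hi _ _
    have : i = j + 1 := by omega
    subst this; rfl
  | succ t ih =>
    intro hi hlen hdig
    have hij : i ≤ j := by omega
    have h1 : pvB_right cs i = pvB_right cs (i + 1) :=
      pvB_right_skip cs i (by omega) (hdig i (by omega) (by omega))
    rw [h1]
    exact ih (i + 1) (by omega) (by omega) (by omega) (fun k hk1 hk2 => hdig k (by omega) hk2)


theorem pvB_left_le (cs : List Char) (j : Nat) : pvB_left cs j ≤ j := by
  induction j with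
  | zero => rfl
  | succ l ih =>
    rw [pvB_left]
    split
    · omega
    · omega


theorem pvB_left_digit (cs : List Char) (j : Nat) :
    ∀ k, pvB_left cs j ≤ k → k < j → pvD cs k = true := by
  induction j with
  | zero => intro k _ hk; omega
  | succ l ih =>
    intro k hk1 hk2
    rw [pvB_left] at hk1
    by_cases hd : PySem.Chars.isdigit (cs.getD l ' ') = true
    · rw [if_pos hd] at hk1
      rcases Nat.lt_or_ge k l with hlt | hge
      · exact ih k hk1 hlt
      · have : k = l := by omega
        subst this; exact hd
    · rw [if_neg hd] at hk1
      omega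


theorem pvB_left_stop (cs : List Char) (j : Nat) :
    pvB_left cs j = 0 ∨ pvD cs (pvB_left cs j - 1) = false := by
  induction j with
  | zero => left; rfl
  | succ l ih =>
    rw [pvB_left]
    by_cases hd : PySem.Chars.isdigit (cs.getD l ' ') = true
    · rw [if_pos hd]; exact ih
    · rw [if_neg hd]; right
      exact Bool.eq_false_iff.mpr hd


theorem pvB_left_agree (cs : List Char) :
    ∀ j i, i ≤ j → (∀ k, i ≤ k → k < j → pvD cs k = true) →
    pvB_left cs j = pvB_left cs i := by
  intro j
  induction j with
  | zero => intro i hi _; interval_cases i; rfl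
  | succ m ih =>
    intro i hi hdig
    rcases Nat.eq_or_lt_of_le hi with rfl | hlt
    · rfl
    · have hm : pvD cs m = true := hdig m (by omega) (by omega)
      unfold pvD at hm
      rw [pvB_left, if_pos hm]
      exact ih i (by omega) (fun k hk1 hk2 => hdig k hk1 (by omega))


theorem pvB_left_start (cs : List Char) (j : Nat) (h : j = 0 ∨ pvD cs (j - 1) = false) :
    pvB_left cs j = j := by
  cases j with
  | zero => rfl
  | succ l =>
    rcases h with h | h
    · omega
    · unfold pvD at h
      simp only [Nat.add_sub_cancel] at h
      rw [pvB_left, if_neg (Bool.eq_false_iff.mp h)]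


theorem pv_collect (cs : List Char) :
    ∀ i, i ≤ cs.length → ∀ acc,
    pvA_collect cs (PySem.List.pyRange (i : Int) (cs.length : Int) 1) acc =
      acc ++ PySem.List.pyRange (i : Int) ((pvB_right cs i : Nat) : Int) 1 := by
  intro i
  induction hfuel : cs.length - i generalizing i with
  | zero =>
    intro hi acc
    have hie : i = cs.length := by omega
    subst hie
    rw [PySem.List.pyRange_one_eq_nil (by omega), pvA_collect]
    rw [pvB_right]
    simp [PySem.List.pyRange_one_eq_nil]
  | succ t ih =>
    intro hi acc
    have hlt : i < cs.length := by omega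
    rw [PySem.List.pyRange_one_cons (by exact_mod_cast hlt)]
    show (if PySem.Chars.isdigit (PySem.List.pyGetD cs (i : Int) ' ') = true then _ else _) = _
    rw [PySem.List.pyGetD_natCast]
    by_cases hd : PySem.Chars.isdigit (cs.getD i ' ') = true
    · rw [if_pos hd]
      have hcast : ((i : Int) + 1) = ((i + 1 : Nat) : Int) := by push_cast; ring
      rw [hcast, ih (i + 1) (by omega) (by omega) (acc ++ [(i : Int)])]
      have hskip : pvB_right cs i = pvB_right cs (i + 1) :=
        pvB_right_skip cs i hlt hd
      have hge : (i : Int) < ((pvB_right cs (i + 1) : Nat) : Int) := by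
        have := pvB_right_ge cs (i + 1); exact_mod_cast by omega
      rw [hskip, List.append_assoc]
      congr 1
      rw [PySem.List.pyRange_one_cons hge, ← hcast]
      rfl
    · rw [if_neg hd]
      have hstop : pvB_right cs i = i := by
        rw [pvB_right]
        have : ¬ PySem.Chars.isdigit cs[i] = true := by
          rw [← pvD_eq_getElem cs i hlt]; exact hd
        simp [hlt, this]
      rw [hstop, PySem.List.pyRange_one_eq_nil (by omega)]
      simp


theorem pv_loop (cs : List Char) :
    ∀ a, a ≤ cs.length → ∀ acc,
    (PySem.List.pyRange (a : Int) ((cs.length : Nat) : Int) 1).foldl (pvA_step cs)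
        (acc, pvFlag cs a) =
      (acc ++ pvRunsFrom cs a, pvFlag cs cs.length) := by
  intro a
  induction hfuel : cs.length - a generalizing a with
  | zero =>
    intro ha acc
    have hae : a = cs.length := by omega
    subst hae
    rw [PySem.List.pyRange_one_eq_nil (by omega), pvRunsFrom]
    simp
  | succ t ih =>
    intro ha acc
    have hlt : a < cs.length := by omega
    rw [PySem.List.pyRange_one_cons (by exact_mod_cast hlt), List.foldl_cons]
    have hge : (a : Int) < ((pvB_right cs (a + 1) : Nat) : Int) := by
      have := pvB_right_ge cs (a + 1); exact_mod_cast by omega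
    have hcast : ((a : Int) + 1) = ((a + 1 : Nat) : Int) := by push_cast; ring
    have hcol : pvA_collect cs (PySem.List.pyRange ((a : Int) + 1) ((cs.length : Nat) : Int) 1) [(a : Int)] =
        PySem.List.pyRange (a : Int) ((pvB_right cs (a + 1) : Nat) : Int) 1 := by
      rw [hcast, pv_collect cs (a + 1) (by omega)]
      rw [PySem.List.pyRange_one_cons hge, ← hcast]
      rfl
    have hstep : pvA_step cs (acc, pvFlag cs a) (a : Int) =
        (if pvD cs a && !pvFlag cs a then
          acc ++ [PySem.List.pyRange (a : Int) ((pvB_right cs (a + 1) : Nat) : Int) 1]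
        else acc, pvFlag cs (a + 1)) := by
      simp only [pvA_step, pvFlag, pvD, PySem.List.pyGetD_natCast, PySem.List.len_eq,
        Nat.add_sub_cancel]
      by_cases hd0 : PySem.Chars.isdigit (cs.getD a ' ') = true
      · by_cases hf0 : (decide (0 < a) && PySem.Chars.isdigit (cs.getD (a - 1) ' ')) = true
        · simp only [hd0, hf0]; simp
        · have hf1 : (decide (0 < a) && PySem.Chars.isdigit (cs.getD (a - 1) ' ')) = false := by
            simpa using hf0
          simp only [hd0, hf1]; simp [hcol]
      · have hd1 : PySem.Chars.isdigit (cs.getD a ' ') = false := by simpa using hd0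
        simp only [hd1]; simp
    rw [hstep]
    by_cases hrun : (pvD cs a && !pvFlag cs a) = true
    · rw [if_pos hrun, hcast, ih (a + 1) (by omega) (by omega)]
      conv_rhs => rw [pvRunsFrom]
      rw [dif_pos hlt, if_pos hrun]
      simp
    · rw [if_neg hrun, hcast, ih (a + 1) (by omega) (by omega)]
      conv_rhs => rw [pvRunsFrom]
      rw [dif_pos hlt, if_neg hrun]
      simp

theorem pv_find_some (cs : List Char) :
    ∀ a j, a ≤ j → j < cs.length → pvD cs j = true → a ≤ pvB_left cs j →
    pvA_find cs (j : Int) (pvRunsFrom cs a) =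
      some (pvA_value cs (PySem.List.pyRange ((pvB_left cs j : Nat) : Int)
        ((pvB_right cs (j + 1) : Nat) : Int) 1)) := by
  intro a
  induction hfuel : cs.length - a generalizing a with
  | zero => intro j ha hj _ _; omega
  | succ t ih =>
    intro j ha hj hdj hbl
    have hlt : a < cs.length := by omega
    rw [pvRunsFrom, dif_pos hlt]
    by_cases hrun : (pvD cs a && !pvFlag cs a) = true
    · rw [if_pos hrun]
      simp only [List.singleton_append, pvA_find]
      have hEge : a + 1 ≤ pvB_right cs (a + 1) := pvB_right_ge cs (a + 1)
      have hparts : pvD cs a = true ∧ pvFlag cs a = false := by simpa using hrun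
      obtain ⟨hda, hflag⟩ := hparts
      have hstart : pvB_left cs a = a := by
        apply pvB_left_start
        rcases Nat.eq_zero_or_pos a with h0 | h0
        · left; exact h0
        · right
          unfold pvFlag at hflag
          simpa [h0] using hflag
      by_cases hj2 : j < pvB_right cs (a + 1)
      · have hmem : (j : Int) ∈ PySem.List.pyRange (a : Int) ((pvB_right cs (a + 1) : Nat) : Int) 1 := by
          rw [PySem.List.mem_pyRange_one]
          constructor
          · exact_mod_cast ha
          · exact_mod_cast hj2
        rw [if_pos hmem]
        -- the run [a, pvB_right (a+1)) is exactly [pvB_left j, pvB_right (j+1))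
        have hdig : ∀ k, a ≤ k → k < j → pvD cs k = true := by
          intro k hk1 hk2
          rcases Nat.eq_or_lt_of_le hk1 with heq | hlt2
          · subst heq; exact hda
          · exact pvB_right_digit cs (a + 1) k (by omega) (by omega)
        have hleft : pvB_left cs j = a := by
          rw [pvB_left_agree cs j a ha hdig, hstart]
        have hright : pvB_right cs (a + 1) = pvB_right cs (j + 1) := by
          apply pvB_right_agree cs j (a + 1) (by omega) (by omega)
          intro k hk1 hk2
          rcases Nat.eq_or_lt_of_le hk2 with heq | hlt2
          · subst heq; exact hdj
          · exact pvB_right_digit cs (a + 1) k hk1 (by omega)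
        rw [hleft, hright]
      · have hmem : ¬ ((j : Int) ∈ PySem.List.pyRange (a : Int) ((pvB_right cs (a + 1) : Nat) : Int) 1) := by
          rw [PySem.List.mem_pyRange_one]
          intro ⟨_, h2⟩
          exact hj2 (by exact_mod_cast h2)
        rw [if_neg hmem]
        -- j lies beyond this run: its own run starts after a
        have hne : pvB_left cs j ≠ a := by
          intro heq
          have hdig : ∀ k, a + 1 ≤ k → k ≤ j → pvD cs k = true := by
            intro k hk1 hk2
            rcases Nat.eq_or_lt_of_le hk2 with heq2 | hlt2
            · subst heq2; exact hdj
            · exact pvB_left_digit cs j k (by omega) hlt2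
          have := pvB_right_agree cs j (a + 1) (by omega) (by omega) hdig
          have := pvB_right_ge cs (j + 1)
          omega
        have hj1 : a + 1 ≤ j := by
          rcases Nat.eq_or_lt_of_le ha with heq | _
          · exfalso; apply hne; have hle := pvB_left_le cs j; omega
          · omega
        exact ih (a + 1) (by omega) j hj1 hj hdj (by omega)
    · rw [if_neg hrun]
      have hne : pvB_left cs j ≠ a := by
        intro heq
        have hstart : pvFlag cs a = false := by
          rcases pvB_left_stop cs j with h0 | h0
          · unfold pvFlag; simp [heq ▸ h0]
          · rw [heq] at h0
            unfold pvFlag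
            cases Nat.eq_zero_or_pos a with
            | inl hz => simp [hz]
            | inr hp =>
              have hdec : decide (0 < a) = true := by simpa using hp
              rw [hdec, Bool.true_and]
              exact h0
        have hda : pvD cs a = true := by
          rcases Nat.eq_or_lt_of_le ha with heq2 | hlt2
          · rw [← heq2] at hdj; exact hdj
          · exact pvB_left_digit cs j a (by omega) hlt2
        rw [hda, hstart] at hrun
        simp at hrun
      have hj1 : a + 1 ≤ j := by
        rcases Nat.eq_or_lt_of_le ha with heq | _
        · exfalso; apply hne; have hle := pvB_left_le cs j; omega
        · omega
      exact ih (a + 1) (by omega) j hj1 hj hdj (by omega)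


theorem pv_find_none (cs : List Char) (index : Int) :
    ∀ a, (∀ j : Nat, index = (j : Int) → a ≤ j → j < cs.length → pvD cs j = false) →
    pvA_find cs index (pvRunsFrom cs a) = none := by
  intro a
  induction hfuel : cs.length - a generalizing a with
  | zero =>
    intro _
    rw [pvRunsFrom, dif_neg (by omega)]
    rfl
  | succ t ih =>
    intro hnone
    have hlt : a < cs.length := by omega
    rw [pvRunsFrom, dif_pos hlt]
    by_cases hrun : (pvD cs a && !pvFlag cs a) = true
    · rw [if_pos hrun]
      simp only [List.singleton_append, pvA_find]
      have hparts : pvD cs a = true ∧ pvFlag cs a = false := by simpa using hrun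
      have hmem : ¬ (index ∈ PySem.List.pyRange (a : Int) ((pvB_right cs (a + 1) : Nat) : Int) 1) := by
        rw [PySem.List.mem_pyRange_one]
        intro ⟨h1, h2⟩
        have hnn : 0 ≤ index := le_trans (by exact_mod_cast Int.natCast_nonneg a) h1
        set j := index.toNat with hjdef
        have hidx : index = (j : Int) := (Int.toNat_of_nonneg hnn).symm
        have haj : a ≤ j := by omega
        have hjE : j < pvB_right cs (a + 1) := by omega
        have hjlen : j < cs.length := by
          have := pvB_right_le cs (a + 1) (by omega)
          omega
        have hdig : pvD cs j = true := by
          rcases Nat.eq_or_lt_of_le haj with heq | hlt2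
          · subst heq; exact hparts.1
          · exact pvB_right_digit cs (a + 1) j (by omega) hjE
        rw [hnone j hidx haj hjlen] at hdig
        exact Bool.false_ne_true hdig
      rw [if_neg hmem]
      exact ih (a + 1) (by omega) (fun j h1 h2 h3 => hnone j h1 (by omega) h3)
    · rw [if_neg hrun]
      exact ih (a + 1) (by omega) (fun j h1 h2 h3 => hnone j h1 (by omega) h3)


theorem pv_value_horner (cs : List Char) (ns : List Int) :
    pvA_value cs ns =
      ns.foldl (fun n k => n * 10 + pvDigitVal (PySem.List.pyGetD cs k ' ')) 0 := by
  have aux : ∀ (ms : List Int) (s : Int) (c : Nat),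
      (ms.foldl (fun st idx => (st.1 + pvDigitVal (PySem.List.pyGetD cs idx ' ') * 10 ^ st.2, st.2 + 1)) (s, c)).1 =
        s + 10 ^ c * (ms.reverse.foldl (fun n k => n * 10 + pvDigitVal (PySem.List.pyGetD cs k ' ')) 0) := by
    intro ms
    induction ms with
    | nil => intro s c; simp
    | cons k t iht =>
      intro s c
      simp only [List.foldl_cons, List.reverse_cons, iht, List.foldl_append, List.foldl_cons, List.foldl_nil]
      ring
  unfold pvA_value
  rw [aux]
  simp


theorem pv_range_map (cs : List Char) :
    ∀ r l : Nat, r ≤ cs.length →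
    (PySem.List.pyRange (l : Int) (r : Int) 1).map (fun k => PySem.List.pyGetD cs k ' ') =
      (cs.drop l).take (r - l) := by
  intro r l
  induction hfuel : r - l generalizing l with
  | zero =>
    intro hr
    have : (r : Int) ≤ (l : Int) := by exact_mod_cast by omega
    rw [PySem.List.pyRange_one_eq_nil this]
    simp
  | succ t ih =>
    intro hr
    have hlt : l < r := by omega
    have hln : l < cs.length := by omega
    rw [PySem.List.pyRange_one_cons (by exact_mod_cast hlt), List.map_cons,
      PySem.List.pyGetD_natCast]
    have hcast : ((l : Int) + 1) = ((l + 1 : Nat) : Int) := by push_cast; ring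
    rw [hcast, ih (l + 1) (by omega) hr]
    rw [List.getD_eq_getElem cs ' ' hln, List.drop_eq_getElem_cons hln]
    rw [List.take_succ_cons]


theorem pv_main (cs : List Char) (index : Int) :
    pvA_find cs index
      ((PySem.List.pyRange 0 (PySem.List.len cs) 1).foldl (pvA_step cs) ([], false)).1 =
    (if 0 ≤ index ∧ index < cs.length ∧ PySem.Chars.isdigit (cs.getD index.toNat ' ') then
      some ((PySem.List.slice cs (some ((pvB_left cs index.toNat : Nat) : Int))
               (some ((pvB_right cs (index.toNat + 1) : Nat) : Int))).foldl
              (fun n c => n * 10 + pvDigitVal c) 0)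
    else none) := by
  have hloop := pv_loop cs 0 (Nat.zero_le _) []
  have hflag0 : pvFlag cs 0 = false := rfl
  rw [hflag0] at hloop
  rw [PySem.List.len_eq]
  have hcast0 : ((0 : Nat) : Int) = (0 : Int) := rfl
  rw [hcast0] at hloop
  rw [hloop]
  simp only [List.nil_append]
  by_cases hc : 0 ≤ index ∧ index < cs.length ∧ PySem.Chars.isdigit (cs.getD index.toNat ' ') = true
  · rw [if_pos (by exact_mod_cast hc)]
    obtain ⟨h1, h2, h3⟩ := hc
    set j := index.toNat with hjdef
    have hidx : index = (j : Int) := (Int.toNat_of_nonneg h1).symm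
    have hjlen : j < cs.length := by omega
    have hfind := pv_find_some cs 0 j (Nat.zero_le _) hjlen h3 (Nat.zero_le _)
    rw [hidx, hfind]
    congr 1
    -- value of the run = Horner evaluation of the slice
    rw [pv_value_horner]
    have hrle : pvB_right cs (j + 1) ≤ cs.length := pvB_right_le cs (j + 1) (by omega)
    have hmap := pv_range_map cs (pvB_right cs (j + 1)) (pvB_left cs j) hrle
    rw [PySem.List.slice_natCast, ← hmap, List.foldl_map]
  · rw [if_neg (by exact_mod_cast hc)]
    apply pv_find_none
    intro j hidx _ hjlen
    by_cases hd : pvD cs j = true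
    · exfalso
      apply hc
      refine ⟨by omega, by omega, ?_⟩
      have : index.toNat = j := by omega
      rw [this]
      exact hd
    · simpa using hd


-- ===== VERDICT (by name: the statement is the Claim_ definition above) =====
theorem get_entire_number_from_index_spec : Claim_equal_get_entire_number_from_index := by
  intro current_line index matrixx _ hpre
  unfold Spec_get_entire_number_from_index
  unfold Pre_get_entire_number_from_index at hpre
  have h := (PySem.List.pyGet?_eq_none_iff (xs := matrixx) (i := current_line))
  rcases hget : PySem.List.pyGet? matrixx current_line with _ | line
  · exact absurd (h.mp hget) (by simpa using hpre)
  · simp only [get_entire_number_from_index, get_entire_number_from_index_alt, hget]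
    exact pv_main line.toList index
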